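-- pv_equiv track=rewrite | github.com/albanD/subclass_zoo | dynamic_strides.py | compute_contiguous_branchy
-- ===== SOURCE A (Python) =====
-- from typing import List
--
-- def compute_numel(sizes: List[int]):
--     numel = 1
--     for s in sizes:
--         numel *= s
--     return numel
--
-- def compute_contiguous_branchy(sizes: List[int], strides: List[int]):
--     is_contiguous = True
--     if compute_numel(sizes) == 0:
--         return is_contiguous
--     z = 1
--     for d in range(len(sizes) - 1, -1, -1):
--         if sizes[d] != 1:
--             if strides[d] == z:
--                 z *= sizes[d]
--             else:
--                 is_contiguous = False
--                 break
--     return is_contiguous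
-- ===== SOURCE B (Python) =====
-- def compute_contiguous_branchy(sizes, strides):
--     if 0 in sizes:
--         return True
--     # keep only the dimensions that matter (size != 1), paired with their strides
--     dense = [(s, t) for s, t in zip(sizes, strides) if s != 1]
--     if not dense:
--         return True
--     # contiguity is a local condition on the dense dims: innermost stride is 1,
--     # and each stride equals the next dim's size times its stride
--     if dense[-1][1] != 1:
--         return False
--     return all(dense[i][1] == dense[i + 1][0] * dense[i + 1][1]
--                for i in range(len(dense) - 1))
-- ===== Notes on version B (the rewrite author's own statement) =====
-- stated objective: alternative
-- what changed: Replaces A's backward accumulator loop (running expected-stride product with early break, plus a full numel product) by a local characterisation: filter out size-1 dims into a dense (size,stride) list, then check the innermost dense stride is 1 and each dense stride equals the next dim's size times its stride; no running product is maintained.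
import Mathlib
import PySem

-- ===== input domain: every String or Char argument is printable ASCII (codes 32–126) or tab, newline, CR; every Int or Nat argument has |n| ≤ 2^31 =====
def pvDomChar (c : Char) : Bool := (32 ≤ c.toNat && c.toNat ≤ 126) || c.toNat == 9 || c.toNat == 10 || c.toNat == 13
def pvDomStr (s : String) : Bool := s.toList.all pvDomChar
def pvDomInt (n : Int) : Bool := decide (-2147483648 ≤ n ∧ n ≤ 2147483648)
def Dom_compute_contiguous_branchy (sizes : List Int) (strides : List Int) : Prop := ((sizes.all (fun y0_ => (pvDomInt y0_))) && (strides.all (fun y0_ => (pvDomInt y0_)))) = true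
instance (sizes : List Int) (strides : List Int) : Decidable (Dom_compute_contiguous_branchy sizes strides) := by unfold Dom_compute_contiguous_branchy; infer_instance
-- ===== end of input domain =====

-- B replaces A's backward running-product loop with early break by a local characterisation:
-- filter out size-1 dims, then check innermost stride = 1 and each stride = next size * next stride.

-- ===== PORT A =====
def compute_numel (sizes : List Int) : Int := sizes.foldl (fun acc s => acc * s) 1

-- the backward for-loop of A, with early exit ("break") on a stride mismatch
def branchyLoop (sizes strides : List Int) : List Int → Int → Bool → Bool
  | [], _, ic => ic
  | d :: ds, z, ic =>
    if PySem.List.pyGetD sizes d 0 ≠ 1 then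
      if PySem.List.pyGetD strides d 0 = z then
        branchyLoop sizes strides ds (z * PySem.List.pyGetD sizes d 0) ic
      else false
    else branchyLoop sizes strides ds z ic

def compute_contiguous_branchy (sizes : List Int) (strides : List Int) : Bool :=
  if compute_numel sizes = 0 then true
  else branchyLoop sizes strides (PySem.List.pyRange ((sizes.length : Int) - 1) (-1) (-1)) 1 true

-- ===== PORT B =====
def compute_contiguous_branchy_alt (sizes : List Int) (strides : List Int) : Bool :=
  if sizes.contains 0 then true
  else
    let dense := (sizes.zip strides).filter (fun p => p.1 != 1)
    if dense.isEmpty then true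
    else if (PySem.List.pyGetD dense (-1) (0, 0)).2 ≠ 1 then false
    else (PySem.List.pyRange 0 ((dense.length : Int) - 1) 1).all (fun i =>
      (PySem.List.pyGetD dense i (0, 0)).2 ==
        (PySem.List.pyGetD dense (i + 1) (0, 0)).1 * (PySem.List.pyGetD dense (i + 1) (0, 0)).2)

-- ===== PRECONDITION & SPEC =====
-- Pre_ excludes exactly the inputs where Python A raises IndexError: no zero size and some
-- dimension with size ≠ 1 lies at an index ≥ len(strides).
def Pre_compute_contiguous_branchy (sizes : List Int) (strides : List Int) : Prop :=
  (0 : Int) ∈ sizes ∨ ∀ x ∈ sizes.drop strides.length, x = 1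
instance (sizes : List Int) (strides : List Int) : Decidable (Pre_compute_contiguous_branchy sizes strides) := by unfold Pre_compute_contiguous_branchy; infer_instance
def pvWitness_compute_contiguous_branchy : List Int × List Int := ([2, 3], [3, 1])

def Spec_compute_contiguous_branchy (sizes : List Int) (strides : List Int) (out : Bool) : Prop := out = compute_contiguous_branchy_alt sizes strides
instance (sizes : List Int) (strides : List Int) (out : Bool) : Decidable (Spec_compute_contiguous_branchy sizes strides out) := by unfold Spec_compute_contiguous_branchy; infer_instance

-- ===== CLAIM =====
def Claim_equal_compute_contiguous_branchy : Prop := ∀ (sizes : List Int) (strides : List Int), Dom_compute_contiguous_branchy sizes strides → Pre_compute_contiguous_branchy sizes strides → Spec_compute_contiguous_branchy sizes strides (compute_contiguous_branchy sizes strides)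

-- ===== LEMMAS AND PROOFS =====

-- the right-to-left check A performs, phrased on the dense (size, stride) list
def rcheck : List (Int × Int) → Int → Bool
  | [], _ => true
  | p :: rest, z => if p.2 = z then rcheck rest (z * p.1) else false

-- suffix-product characterisation: every dense stride is the product of the sizes to its right
def SuffixProds (L : List (Int × Int)) : Prop :=
  ∀ i (h : i < L.length), L[i].2 = ((L.drop (i + 1)).map Prod.fst).prod

theorem rcheck_iff (M : List (Int × Int)) (z : Int) :
    rcheck M z = true ↔ ∀ i (h : i < M.length), M[i].2 = z * ((M.take i).map Prod.fst).prod := by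
  induction M generalizing z with
  | nil => simp [rcheck]
  | cons p rest ih =>
    simp only [rcheck]
    by_cases hz : p.2 = z
    · rw [if_pos hz, ih]
      constructor
      · intro h i hi
        cases i with
        | zero => simpa using hz
        | succ j =>
          have := h j (by simpa using hi)
          simpa [List.take_succ_cons, mul_assoc] using this
      · intro h i hi
        have := h (i + 1) (by simpa using hi)
        simpa [List.take_succ_cons, mul_assoc] using this
    · rw [if_neg hz]
      constructor
      · intro h; simp at h
      · intro h
        exact absurd (by simpa using h 0 (by simp)) hz

theorem rcheck_reverse_iff (L : List (Int × Int)) :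
    rcheck L.reverse 1 = true ↔ SuffixProds L := by
  rw [rcheck_iff]
  constructor
  · intro h j hj
    have hi : L.length - 1 - j < L.reverse.length := by simp; omega
    have := h (L.length - 1 - j) hi
    rw [List.getElem_reverse, List.take_reverse, List.map_reverse, List.prod_reverse, one_mul]
      at this
    rw [getElem_congr rfl (by omega : L.length - 1 - (L.length - 1 - j) = j) (by omega),
        show L.length - (L.length - 1 - j) = j + 1 by omega] at this
    exact this
  · intro h i hi
    have hlen : i < L.length := by simpa using hi
    rw [List.getElem_reverse, List.take_reverse, List.map_reverse, List.prod_reverse, one_mul]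
    have := h (L.length - 1 - i) (by omega)
    rw [show L.length - 1 - i + 1 = L.length - i by omega] at this
    exact this

theorem suffixProds_cons (p : Int × Int) (rest : List (Int × Int)) :
    SuffixProds (p :: rest) ↔ p.2 = (rest.map Prod.fst).prod ∧ SuffixProds rest := by
  constructor
  · intro h
    exact ⟨by simpa using h 0 (by simp),
      fun i hi => by simpa using h (i + 1) (by simpa using hi)⟩
  · rintro ⟨h0, h⟩ i hi
    cases i with
    | zero => simpa using h0
    | succ j => simpa using h j (by simpa using hi)

theorem suffix_iff_local : ∀ (L : List (Int × Int)) (hne : L ≠ []),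
    SuffixProds L ↔ (L.getLast hne).2 = 1 ∧
      ∀ i (h : i + 1 < L.length), L[i].2 = L[i + 1].1 * L[i + 1].2
  | [], hne => absurd rfl hne
  | [p], _ => by
    constructor
    · intro h
      exact ⟨by simpa using h 0 (by simp), fun i hi => by simp at hi⟩
    · rintro ⟨h1, -⟩ i hi
      have hi0 : i = 0 := by simpa using hi
      subst hi0
      simpa using h1
  | p :: q :: r, _ => by
    have ih := suffix_iff_local (q :: r) (by simp)
    rw [suffixProds_cons]
    constructor
    · rintro ⟨h0, hS⟩
      obtain ⟨hlast, hpair⟩ := ih.mp hS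
      refine ⟨by rw [List.getLast_cons (by simp)]; exact hlast, ?_⟩
      intro i hi
      cases i with
      | zero =>
        have hq : q.2 = (r.map Prod.fst).prod := by simpa using hS 0 (by simp)
        simpa [hq, mul_assoc] using h0
      | succ j => simpa using hpair j (by simpa using hi)
    · rintro ⟨hlast, hpair⟩
      rw [List.getLast_cons (by simp)] at hlast
      have hpair' : ∀ i (h : i + 1 < (q :: r).length),
          (q :: r)[i].2 = (q :: r)[i + 1].1 * (q :: r)[i + 1].2 := by
        intro i hi
        simpa using hpair (i + 1) (by simpa using hi)
      have hS := ih.mpr ⟨hlast, hpair'⟩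
      refine ⟨?_, hS⟩
      have hq : q.2 = (r.map Prod.fst).prod := by simpa using hS 0 (by simp)
      have h0 : p.2 = q.1 * q.2 := by simpa using hpair 0 (by simp)
      simp [h0, hq]

-- A's loop equals the right-to-left check of the dense prefix, given Pre_'s second disjunct
theorem branchyLoop_eq_rcheck (sizes strides : List Int)
    (hpre : ∀ x ∈ sizes.drop strides.length, x = 1)
    (k : Nat) (hk : k ≤ sizes.length) (z : Int) :
    branchyLoop sizes strides (PySem.List.pyRange ((k : Int) - 1) (-1) (-1)) z true =
      rcheck ((((sizes.zip strides).take k).filter (fun p => p.1 != 1)).reverse) z := by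
  induction k generalizing z with
  | zero =>
    rw [PySem.List.pyRange_neg_one_eq_nil (by norm_num)]
    simp [branchyLoop, rcheck]
  | succ k ih =>
    have hklt : k < sizes.length := hk
    rw [show ((k + 1 : Nat) : Int) - 1 = (k : Int) by push_cast; ring,
        PySem.List.pyRange_neg_one_cons (by omega)]
    simp only [branchyLoop, PySem.List.pyGetD_natCast]
    rw [List.getD_eq_getElem sizes 0 hklt]
    by_cases hs : sizes[k] ≠ 1
    · rw [if_pos hs]
      have hkt : k < strides.length := by
        by_contra hge
        exact hs (hpre sizes[k] (by
          rw [List.mem_iff_getElem]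
          exact ⟨k - strides.length, by simp; omega, by rw [List.getElem_drop]; congr 1; omega⟩))
      have hzip : k < (sizes.zip strides).length := by simp; omega
      rw [List.getD_eq_getElem strides 0 hkt]
      have htake : (sizes.zip strides).take (k + 1) =
          (sizes.zip strides).take k ++ [(sizes[k], strides[k])] := by
        rw [List.take_succ, List.getElem?_eq_getElem hzip, List.getElem_zip, Option.toList_some]
      rw [htake, List.filter_append, List.filter_cons_of_pos (by simpa using hs), List.filter_nil,
        List.reverse_append]
      simp only [List.reverse_cons, List.reverse_nil, List.nil_append, List.cons_append, rcheck]
      by_cases ht : strides[k] = z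
      · rw [if_pos ht, if_pos ht, ih (by omega)]
      · rw [if_neg ht, if_neg ht]
    · rw [if_neg hs]
      rw [ih (by omega) z]
      congr 2
      rcases Nat.lt_or_ge k (sizes.zip strides).length with hzip | hzip
      · have hkt : k < strides.length := by
          have h' := hzip; simp at h'; omega
        have htake : (sizes.zip strides).take (k + 1) =
            (sizes.zip strides).take k ++ [(sizes[k], strides[k])] := by
          rw [List.take_succ, List.getElem?_eq_getElem hzip, List.getElem_zip, Option.toList_some]
        rw [htake, List.filter_append, List.filter_cons_of_neg (by simpa using hs),
          List.filter_nil, List.append_nil]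
      · rw [List.take_succ, List.getElem?_eq_none (by simpa using hzip)]
        simp

theorem numel_eq_zero_iff (sizes : List Int) :
    compute_numel sizes = 0 ↔ sizes.contains 0 = true := by
  unfold compute_numel
  rw [← List.prod_eq_foldl, List.prod_eq_zero_iff, List.contains_iff_mem]

-- B's boolean test equals the local condition
theorem alt_all_iff (L : List (Int × Int)) :
    (((PySem.List.pyRange 0 ((L.length : Int) - 1) 1).all (fun i =>
      (PySem.List.pyGetD L i (0, 0)).2 ==
        (PySem.List.pyGetD L (i + 1) (0, 0)).1 * (PySem.List.pyGetD L (i + 1) (0, 0)).2)) = true)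
    ↔ ∀ i (h : i + 1 < L.length), L[i].2 = L[i + 1].1 * L[i + 1].2 := by
  simp only [List.all_eq_true, PySem.List.mem_pyRange_one]
  have e1 : ∀ i : Nat, i < L.length → PySem.List.pyGetD L (i : Int) (0, 0) = L.getD i (0, 0) :=
    fun i _ => PySem.List.pyGetD_natCast ..
  constructor
  · intro h i hi
    have := h (i : Int) ⟨by omega, by omega⟩
    rw [e1 i (by omega), show ((i : Int) + 1) = ((i + 1 : Nat) : Int) by push_cast; ring,
        e1 (i + 1) hi, List.getD_eq_getElem _ _ (by omega), List.getD_eq_getElem _ _ hi] at this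
    exact beq_iff_eq.mp this
  · intro h x hx
    obtain ⟨i, rfl⟩ : ∃ i : Nat, (i : Int) = x := ⟨x.toNat, by omega⟩
    have hi : i + 1 < L.length := by omega
    rw [e1 i (by omega), show ((i : Int) + 1) = ((i + 1 : Nat) : Int) by push_cast; ring,
        e1 (i + 1) hi, List.getD_eq_getElem _ _ (by omega), List.getD_eq_getElem _ _ hi]
    exact beq_iff_eq.mpr (h i hi)

-- ===== VERDICT =====
theorem compute_contiguous_branchy_spec : Claim_equal_compute_contiguous_branchy := by
  intro sizes strides _ hpre
  unfold Spec_compute_contiguous_branchy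
  unfold compute_contiguous_branchy compute_contiguous_branchy_alt
  by_cases h0 : compute_numel sizes = 0
  · rw [if_pos h0, if_pos ((numel_eq_zero_iff sizes).mp h0)]
  · have hc : ¬ sizes.contains 0 = true := fun hc => h0 ((numel_eq_zero_iff sizes).mpr hc)
    rw [if_neg h0, if_neg hc]
    have hpre2 : ∀ x ∈ sizes.drop strides.length, x = 1 := by
      rcases hpre with h | h
      · exact absurd (by simpa [List.contains_iff_mem] using h) hc
      · exact h
    have hA := branchyLoop_eq_rcheck sizes strides hpre2 sizes.length le_rfl 1
    rw [List.take_of_length_le (by simp)] at hA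
    set dense := (sizes.zip strides).filter (fun p => p.1 != 1) with hd
    rw [hA]
    by_cases hne : dense = []
    · simp [hne, rcheck]
    · rw [if_neg (by simpa using hne)]
      have hiff := (rcheck_reverse_iff dense).trans (suffix_iff_local dense hne)
      rw [PySem.List.pyGetD_neg_one dense (0, 0) hne]
      by_cases hlast : (dense.getLast hne).2 = 1
      · rw [if_neg (by simpa using hlast)]
        rw [Bool.eq_iff_iff, hiff, alt_all_iff dense]
        exact ⟨fun h => h.2, fun h => ⟨hlast, h⟩⟩
      · rw [if_pos (by simpa using hlast)]
        cases h : rcheck dense.reverse 1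
        · rfl
        · exact absurd (hiff.mp h).1 hlast
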